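-- pv_equiv track=rewrite | github.com/mbabai/HexStrike | scripts/hex_diagrams_creator.py | _parse_path
-- ===== SOURCE A (Python) =====
-- DIRS = {
--     "F":  (1, 0),
--     "L":  (1, -1),
--     "R":  (0, 1),
--     "B":  (-1, 0),
--     "BL": (-1, 1),
--     "BR": (0, -1),
-- }
--
-- def _parse_path(path_str: str):
--     """
--     Parse the position part (before the action) into a list of (Dir, dist),
--     and return (steps, (q,r)).
--
--     - Supports explicit dirs: F, L, R, B, BL, BR
--     - Optional integer after each dir
--     - Bare leading integer = F distance, e.g. "2" -> F2
--     """
--     steps = []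
--     i = 0
--     n = len(path_str)
--
--     if n == 0:
--         # default: one step forward
--         steps.append(("F", 1))
--     else:
--         # leading bare number = Fk
--         if path_str[0].isdigit():
--             j = 0
--             while j < n and path_str[j].isdigit():
--                 j += 1
--             dist = int(path_str[:j])
--             steps.append(("F", dist))
--             i = j
--
--         while i < n:
--             # two-letter dirs first
--             if path_str.startswith("BL", i):
--                 d = "BL"
--                 i += 2
--             elif path_str.startswith("BR", i):
--                 d = "BR"
--                 i += 2
--             else:
--                 ch = path_str[i]
--                 if ch in ("F", "L", "R", "B"):
--                     d = ch
--                     i += 1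
--                 else:
--                     raise ValueError(f"Invalid direction char '{ch}' in path '{path_str}'")
--
--             # optional digits after this dir
--             j = i
--             while j < n and path_str[j].isdigit():
--                 j += 1
--             dist = int(path_str[i:j]) if j > i else 1
--             i = j
--             steps.append((d, dist))
--
--     q = r = 0
--     for d, dist in steps:
--         dq, dr = DIRS[d]
--         q += dq * dist
--         r += dr * dist
--
--     return steps, (q, r)
-- ===== SOURCE B (Python) =====
-- DIRS = {
--     "F":  (1, 0),
--     "L":  (1, -1),
--     "R":  (0, 1),
--     "B":  (-1, 0),
--     "BL": (-1, 1),
--     "BR": (0, -1),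
-- }
--
--
-- def _split_digits(s):
--     """Split s into its maximal leading digit run and the remainder."""
--     if s and s[0].isdigit():
--         num, rest = _split_digits(s[1:])
--         return s[0] + num, rest
--     return "", s
--
--
-- def _steps(s, orig):
--     """Recursively tokenise the tail of the path into (dir, dist) steps."""
--     if not s:
--         return []
--     if s[:2] in ("BL", "BR"):
--         d, rest = s[:2], s[2:]
--     elif s[0] in ("F", "L", "R", "B"):
--         d, rest = s[0], s[1:]
--     else:
--         raise ValueError(f"Invalid direction char '{s[0]}' in path '{orig}'")
--     num, rest = _split_digits(rest)
--     return [(d, int(num) if num else 1)] + _steps(rest, orig)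
--
--
-- def _parse_path(path_str: str):
--     if path_str == "":
--         steps = [("F", 1)]
--     else:
--         num, rest = _split_digits(path_str)
--         steps = ([("F", int(num))] if num else []) + _steps(rest, path_str)
--     q = sum(DIRS[d][0] * n for d, n in steps)
--     r = sum(DIRS[d][1] * n for d, n in steps)
--     return steps, (q, r)
-- ===== Notes on version B (the rewrite author's own statement) =====
-- stated objective: simpler
-- what changed: A's single index-driven while loop with manual startswith/index bookkeeping is replaced by a recursive tokeniser over string suffixes with a _split_digits helper, and the (q,r) fold over steps is replaced by two sum() comprehensions.
import Mathlib
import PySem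

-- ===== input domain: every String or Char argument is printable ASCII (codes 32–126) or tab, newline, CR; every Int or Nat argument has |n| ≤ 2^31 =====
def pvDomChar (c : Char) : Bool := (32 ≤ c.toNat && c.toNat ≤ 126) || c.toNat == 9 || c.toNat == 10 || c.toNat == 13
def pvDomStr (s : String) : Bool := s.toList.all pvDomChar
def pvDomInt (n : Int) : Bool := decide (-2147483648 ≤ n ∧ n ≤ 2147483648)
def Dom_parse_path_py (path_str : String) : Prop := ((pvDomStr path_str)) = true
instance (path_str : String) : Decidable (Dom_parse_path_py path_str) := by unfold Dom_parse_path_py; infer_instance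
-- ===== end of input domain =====

-- B replaces A's index-driven while loop by a recursive tokeniser over string suffixes and
-- computes the coordinates as two comprehension sums instead of a paired fold (objective: simpler).
-- Outside Pre_ both Pythons raise the same ValueError; the ports' values there are not claimed.

-- shared module constant DIRS (both Python files define it identically)
def pvDIRS : PySem.Dict String (Int × Int) :=
  PySem.Dict.ofList [("F", (1, 0)), ("L", (1, -1)), ("R", (0, 1)),
                     ("B", (-1, 0)), ("BL", (-1, 1)), ("BR", (0, -1))]

-- ===== PORT A =====

-- while j < n and path_str[j].isdigit(): j += 1   (returns the final j; the fuel argument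
-- only makes the loop total — cs.length - j iterations always suffice)
def pvDigitsEndGo (cs : List Char) : Nat → Nat → Nat
  | 0, j => j
  | fuel + 1, j =>
    if j < cs.length && PySem.Chars.isdigit (cs.getD j ' ') then pvDigitsEndGo cs fuel (j + 1)
    else j

def pvDigitsEnd (cs : List Char) (j : Nat) : Nat := pvDigitsEndGo cs (cs.length - j) j

-- the direction token recognised at index i together with the index after it
-- (A's `if path_str.startswith("BL", i): … elif … else: raise`; none = the ValueError branch)
def pvDir? (cs : List Char) (i : Nat) : Option (String × Nat) :=
  if PySem.Chars.startswith (cs.drop i) ['B', 'L'] then some ("BL", i + 2)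
  else if PySem.Chars.startswith (cs.drop i) ['B', 'R'] then some ("BR", i + 2)
  else if cs.getD i ' ' = 'F' ∨ cs.getD i ' ' = 'L' ∨ cs.getD i ' ' = 'R' ∨ cs.getD i ' ' = 'B' then
    some (String.ofList [cs.getD i ' '], i + 1)
  else none

-- A's main while loop over the index i (fuel only makes it total; i advances each iteration)
def pvLoopAGo (cs : List Char) : Nat → Nat → List (String × Int) → List (String × Int)
  | 0, _, steps => steps
  | fuel + 1, i, steps =>
    if i < cs.length then
      match pvDir? cs i with
      | none => steps
      | some (d, i2) =>
        let j := pvDigitsEnd cs i2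
        let dist : Int :=
          if i2 < j then (PySem.Int.ofChars? ((cs.drop i2).take (j - i2))).getD 0 else 1
        pvLoopAGo cs fuel j (steps ++ [(d, dist)])
    else steps

def pvLoopA (cs : List Char) (i : Nat) (steps : List (String × Int)) : List (String × Int) :=
  pvLoopAGo cs (cs.length - i) i steps

-- the `steps` list A builds (empty-string default, bare leading integer, then the loop)
def pvStepsA (cs : List Char) : List (String × Int) :=
  if cs.length = 0 then [("F", 1)]
  else if PySem.Chars.isdigit (cs.getD 0 ' ') then
    pvLoopA cs (pvDigitsEnd cs 0)
      [("F", (PySem.Int.ofChars? (cs.take (pvDigitsEnd cs 0))).getD 0)]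
  else pvLoopA cs 0 []

def parse_path_py (path_str : String) : (List (String × Int)) × (Int × Int) :=
  let steps := pvStepsA path_str.toList
  let qr : Int × Int := steps.foldl (fun qr st =>
      let dqr := (PySem.Dict.get? pvDIRS st.1).getD (0, 0)
      (qr.1 + dqr.1 * st.2, qr.2 + dqr.2 * st.2)) (0, 0)
  (steps, qr)

-- ===== PORT B =====

-- _split_digits: maximal leading digit run and remainder, recursively
def pvSplitDigits : List Char → List Char × List Char
  | [] => ([], [])
  | c :: rest =>
    if PySem.Chars.isdigit c then
      let (num, r) := pvSplitDigits rest
      (c :: num, r)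
    else ([], c :: rest)

-- _steps: recursive tokeniser over the string suffix (the raise branch returns [], excluded
-- by Pre_; the fuel argument only makes the recursion total — s.length calls always suffice)
def pvStepsBGo : Nat → List Char → List (String × Int)
  | 0, _ => []
  | fuel + 1, s =>
    match s with
    | [] => []
    | c :: rest0 =>
      let s' := c :: rest0
      if s'.take 2 = ['B', 'L'] ∨ s'.take 2 = ['B', 'R'] then
        let d := String.ofList (s'.take 2)
        let nr := pvSplitDigits (s'.drop 2)
        (d, if nr.1 ≠ [] then (PySem.Int.ofChars? nr.1).getD 0 else 1) :: pvStepsBGo fuel nr.2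
      else if c = 'F' ∨ c = 'L' ∨ c = 'R' ∨ c = 'B' then
        let nr := pvSplitDigits rest0
        (String.ofList [c], if nr.1 ≠ [] then (PySem.Int.ofChars? nr.1).getD 0 else 1)
          :: pvStepsBGo fuel nr.2
      else []

def pvStepsB (s : List Char) : List (String × Int) := pvStepsBGo s.length s

-- the `steps` list B builds (empty-string default, _split_digits, then _steps)
def pvStepsBTop (cs : List Char) : List (String × Int) :=
  if cs = [] then [("F", 1)]
  else
    (if (pvSplitDigits cs).1 ≠ [] then
       [("F", (PySem.Int.ofChars? (pvSplitDigits cs).1).getD 0)]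
     else []) ++ pvStepsB (pvSplitDigits cs).2

def parse_path_py_alt (path_str : String) : (List (String × Int)) × (Int × Int) :=
  let steps := pvStepsBTop path_str.toList
  let q := (steps.map (fun st => ((PySem.Dict.get? pvDIRS st.1).getD (0, 0)).1 * st.2)).sum
  let r := (steps.map (fun st => ((PySem.Dict.get? pvDIRS st.1).getD (0, 0)).2 * st.2)).sum
  (steps, (q, r))

-- ===== PRECONDITION & SPEC =====
-- Pre_ = the language A parses without raising: an optional bare leading integer, then tokens
-- (BL|BR|F|L|R|B) each followed by optional digits; on every other string A raises ValueError
-- (and B raises the identical ValueError).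
def pvValidB : List Char → Bool
  | [] => true
  | 'B' :: 'L' :: r => pvValidB r
  | 'B' :: 'R' :: r => pvValidB r
  | c :: rest =>
    if PySem.Chars.isdigit c then pvValidB rest
    else (c == 'F' || c == 'L' || c == 'R' || c == 'B') && pvValidB rest

def Pre_parse_path_py (path_str : String) : Prop :=
  pvValidB path_str.toList = true
instance (path_str : String) : Decidable (Pre_parse_path_py path_str) := by
  unfold Pre_parse_path_py; infer_instance

def pvWitness_parse_path_py : String := "2BL3R"

def Spec_parse_path_py (path_str : String) (out : (List (String × Int)) × (Int × Int)) : Prop :=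
  out = parse_path_py_alt path_str
instance (path_str : String) (out : (List (String × Int)) × (Int × Int)) :
    Decidable (Spec_parse_path_py path_str out) := by unfold Spec_parse_path_py; infer_instance

-- ===== CLAIM (what is proved, stated in full; the proofs are below) =====
def Claim_equal_parse_path_py : Prop :=
  ∀ (path_str : String), Dom_parse_path_py path_str → Pre_parse_path_py path_str →
    Spec_parse_path_py path_str (parse_path_py path_str)

-- ===== LEMMAS AND PROOFS =====

theorem pvTakeWhile_take (p : Char → Bool) (l : List Char) :
    l.take (l.takeWhile p).length = l.takeWhile p := by
  have h := List.take_left (l₁ := l.takeWhile p) (l₂ := l.dropWhile p)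
  rwa [List.takeWhile_append_dropWhile] at h

theorem pvTakeWhile_drop (p : Char → Bool) (l : List Char) :
    l.drop (l.takeWhile p).length = l.dropWhile p := by
  have h := List.drop_left (l₁ := l.takeWhile p) (l₂ := l.dropWhile p)
  rwa [List.takeWhile_append_dropWhile] at h

theorem pvDropDrop (cs : List Char) (n m : Nat) : (cs.drop n).drop m = cs.drop (n + m) := by
  rw [List.drop_drop]

theorem pvSplitDigits_eq (s : List Char) :
    pvSplitDigits s = (s.takeWhile PySem.Chars.isdigit, s.dropWhile PySem.Chars.isdigit) := by
  induction s with
  | nil => simp [pvSplitDigits]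
  | cons c rest ih =>
    cases hc : PySem.Chars.isdigit c <;>
      simp [pvSplitDigits, List.takeWhile_cons, List.dropWhile_cons, hc, ih]

theorem pvSplitDigits_snd_length (s : List Char) : (pvSplitDigits s).2.length ≤ s.length := by
  rw [pvSplitDigits_eq]
  simpa using List.length_dropWhile_le (p := PySem.Chars.isdigit) s

theorem pvGetD_head (cs : List Char) (i : Nat) (h : i < cs.length) : cs.getD i ' ' = cs[i] := by
  rw [List.getD_eq_getElem?_getD]; simp [List.getElem?_eq_getElem h]

theorem pvDigitsEndGo_eq (cs : List Char) :
    ∀ (fuel j : Nat), cs.length ≤ j + fuel →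
      pvDigitsEndGo cs fuel j = j + ((cs.drop j).takeWhile PySem.Chars.isdigit).length := by
  intro fuel
  induction fuel with
  | zero =>
    intro j h
    simp only [pvDigitsEndGo]
    rw [List.drop_eq_nil_of_le (by omega)]
    simp
  | succ fuel ih =>
    intro j h
    simp only [pvDigitsEndGo]
    by_cases hj : j < cs.length
    · have hdrop := List.drop_eq_getElem_cons hj
      rw [pvGetD_head cs j hj]
      cases hdig : PySem.Chars.isdigit cs[j] with
      | true =>
        rw [if_pos (by simp [hj, hdig]), ih (j + 1) (by omega), hdrop,
            List.takeWhile_cons, hdig]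
        simp <;> omega
      | false =>
        rw [if_neg (by simp [hdig]), hdrop, List.takeWhile_cons, hdig]
        simp
    · rw [if_neg (by simp [hj]), List.drop_eq_nil_of_le (by omega)]
      simp

theorem pvDigitsEnd_eq (cs : List Char) (j : Nat) :
    pvDigitsEnd cs j = j + ((cs.drop j).takeWhile PySem.Chars.isdigit).length := by
  unfold pvDigitsEnd
  exact pvDigitsEndGo_eq cs (cs.length - j) j (by omega)

theorem pvDigitsEnd_ge (cs : List Char) (j : Nat) : j ≤ pvDigitsEnd cs j := by
  rw [pvDigitsEnd_eq]; omega

theorem pvDir?_gt (cs : List Char) (i : Nat) (d : String) (i2 : Nat)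
    (h : pvDir? cs i = some (d, i2)) : i < i2 := by
  unfold pvDir? at h
  split at h
  · obtain ⟨-, h2⟩ := Prod.mk.injEq .. ▸ Option.some.inj h; omega
  · split at h
    · obtain ⟨-, h2⟩ := Prod.mk.injEq .. ▸ Option.some.inj h; omega
    · split at h
      · obtain ⟨-, h2⟩ := Prod.mk.injEq .. ▸ Option.some.inj h; omega
      · exact absurd h (by simp)

-- the dist A computes after a direction ending at index i2, and the dist B computes there
def pvDistA (cs : List Char) (i2 : Nat) : Int :=
  if i2 < pvDigitsEnd cs i2 then
    (PySem.Int.ofChars? ((cs.drop i2).take (pvDigitsEnd cs i2 - i2))).getD 0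
  else 1

def pvDistB (cs : List Char) (i2 : Nat) : Int :=
  if (pvSplitDigits (cs.drop i2)).1 ≠ [] then
    (PySem.Int.ofChars? (pvSplitDigits (cs.drop i2)).1).getD 0
  else 1

theorem pvDist_eq (cs : List Char) (i2 : Nat) : pvDistA cs i2 = pvDistB cs i2 := by
  unfold pvDistA pvDistB
  rw [pvDigitsEnd_eq, pvSplitDigits_eq]
  by_cases hz : ((cs.drop i2).takeWhile PySem.Chars.isdigit).length = 0
  · simp [List.length_eq_zero_iff.mp hz]
  · have hlt : i2 < i2 + ((cs.drop i2).takeWhile PySem.Chars.isdigit).length := by omega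
    have hne : ((cs.drop i2).takeWhile PySem.Chars.isdigit) ≠ [] := by
      intro hh; simp [hh] at hz
    rw [if_pos hlt, if_pos hne]
    have harg : i2 + ((cs.drop i2).takeWhile PySem.Chars.isdigit).length - i2
        = ((cs.drop i2).takeWhile PySem.Chars.isdigit).length := by omega
    rw [harg, pvTakeWhile_take]

theorem pvDrop_digitsEnd (cs : List Char) (i2 : Nat) :
    cs.drop (pvDigitsEnd cs i2) = (pvSplitDigits (cs.drop i2)).2 := by
  rw [pvDigitsEnd_eq, pvSplitDigits_eq, ← pvDropDrop]
  exact pvTakeWhile_drop _ _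

theorem pvStepsBGo_fuel (fuel : Nat) :
    ∀ (s : List Char), s.length ≤ fuel → pvStepsBGo fuel s = pvStepsB s := by
  induction fuel using Nat.strong_induction_on with
  | _ fuel ih =>
    intro s hs
    cases s with
    | nil => cases fuel <;> rfl
    | cons c rest0 =>
      cases fuel with
      | zero => simp at hs
      | succ f =>
        show pvStepsBGo (f + 1) (c :: rest0) = pvStepsBGo (rest0.length + 1) (c :: rest0)
        simp only [pvStepsBGo]
        have hf : rest0.length ≤ f := by simpa using hs
        split
        · have hl := pvSplitDigits_snd_length ((c :: rest0).drop 2)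
          have hl2 : (pvSplitDigits ((c :: rest0).drop 2)).2.length ≤ rest0.length :=
            le_trans hl (by simp only [List.length_drop, List.length_cons]; omega)
          rw [ih f (by omega) _ (by omega), ih rest0.length (by omega) _ hl2]
        · split
          · have hl := pvSplitDigits_snd_length rest0
            rw [ih f (by omega) _ (by omega), ih rest0.length (by omega) _ hl]
          · rfl

theorem pvStepsB_none (cs : List Char) (i : Nat) (hlt : i < cs.length)
    (hd : pvDir? cs i = none) : pvStepsB (cs.drop i) = [] := by
  unfold pvDir? at hd
  split at hd
  · exact absurd hd (by simp)
  · split at hd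
    · exact absurd hd (by simp)
    · split at hd
      · exact absurd hd (by simp)
      · rename_i hBL hBR hch
        have hdrop := List.drop_eq_getElem_cons hlt
        rw [pvGetD_head cs i hlt] at hch
        rw [hdrop]
        simp only [pvStepsB, List.length_cons, pvStepsBGo]
        rw [← hdrop]
        have h2 : ¬ ((cs.drop i).take 2 = ['B', 'L'] ∨ (cs.drop i).take 2 = ['B', 'R']) := by
          rintro (h | h)
          · exact hBL ((PySem.Chars.startswith_iff _ _).mpr (h ▸ List.take_prefix 2 (cs.drop i)))
          · exact hBR ((PySem.Chars.startswith_iff _ _).mpr (h ▸ List.take_prefix 2 (cs.drop i)))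
        rw [if_neg h2, if_neg hch]

theorem pvStepsB_some (cs : List Char) (i : Nat) (d : String) (i2 : Nat) (hlt : i < cs.length)
    (hd : pvDir? cs i = some (d, i2)) :
    pvStepsB (cs.drop i) = (d, pvDistB cs i2) :: pvStepsB (pvSplitDigits (cs.drop i2)).2 := by
  have hdrop := List.drop_eq_getElem_cons hlt
  unfold pvDir? at hd
  split at hd
  · rename_i hBL
    obtain ⟨hd1, hd2⟩ := Prod.mk.injEq .. ▸ Option.some.inj hd
    subst hd1; subst hd2
    have hpre := (PySem.Chars.startswith_iff _ _).mp hBL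
    have htake2 : (cs.drop i).take 2 = ['B', 'L'] := by
      have := List.prefix_iff_eq_take.mp hpre
      simpa using this.symm
    rw [hdrop]
    simp only [pvStepsB, List.length_cons, pvStepsBGo]
    rw [← hdrop, if_pos (Or.inl htake2), htake2, pvDropDrop cs i 2]
    have hl := pvSplitDigits_snd_length (cs.drop (i + 2))
    rw [pvStepsBGo_fuel ((cs.drop (i + 1)).length) _
        (le_trans hl (by simp only [List.length_drop]; omega))]
    rfl
  · split at hd
    · rename_i hBL hBR
      obtain ⟨hd1, hd2⟩ := Prod.mk.injEq .. ▸ Option.some.inj hd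
      subst hd1; subst hd2
      have hpre := (PySem.Chars.startswith_iff _ _).mp hBR
      have htake2 : (cs.drop i).take 2 = ['B', 'R'] := by
        have := List.prefix_iff_eq_take.mp hpre
        simpa using this.symm
      rw [hdrop]
      simp only [pvStepsB, List.length_cons, pvStepsBGo]
      rw [← hdrop, if_pos (Or.inr htake2), htake2, pvDropDrop cs i 2]
      have hl := pvSplitDigits_snd_length (cs.drop (i + 2))
      rw [pvStepsBGo_fuel ((cs.drop (i + 1)).length) _
          (le_trans hl (by simp only [List.length_drop]; omega))]
      rfl
    · split at hd
      · rename_i hBL hBR hch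
        obtain ⟨hd1, hd2⟩ := Prod.mk.injEq .. ▸ Option.some.inj hd
        subst hd1; subst hd2
        rw [pvGetD_head cs i hlt] at hch
        rw [hdrop]
        simp only [pvStepsB, List.length_cons, pvStepsBGo]
        rw [← hdrop]
        have h2 : ¬ ((cs.drop i).take 2 = ['B', 'L'] ∨ (cs.drop i).take 2 = ['B', 'R']) := by
          rintro (h | h)
          · exact hBL ((PySem.Chars.startswith_iff _ _).mpr (h ▸ List.take_prefix 2 (cs.drop i)))
          · exact hBR ((PySem.Chars.startswith_iff _ _).mpr (h ▸ List.take_prefix 2 (cs.drop i)))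
        rw [if_neg h2, if_pos hch, pvGetD_head cs i hlt]
        have hl := pvSplitDigits_snd_length (cs.drop (i + 1))
        rw [pvStepsBGo_fuel ((cs.drop (i + 1)).length) _ hl]
        rfl
      · exact absurd hd (by simp)

theorem pvLoopAGo_eq (cs : List Char) :
    ∀ (fuel i : Nat) (acc : List (String × Int)), cs.length ≤ i + fuel →
      pvLoopAGo cs fuel i acc = acc ++ pvStepsB (cs.drop i) := by
  intro fuel
  induction fuel with
  | zero =>
    intro i acc h
    have hnil : cs.drop i = [] := List.drop_eq_nil_of_le (by omega)
    simp [pvLoopAGo, hnil, pvStepsB, pvStepsBGo]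
  | succ fuel ih =>
    intro i acc h
    simp only [pvLoopAGo]
    by_cases hlt : i < cs.length
    · rw [if_pos hlt]
      cases hd : pvDir? cs i with
      | none =>
        dsimp only
        rw [pvStepsB_none cs i hlt hd, List.append_nil]
      | some di =>
        obtain ⟨d, i2⟩ := di
        dsimp only
        have hgt := pvDir?_gt cs i d i2 hd
        have hge := pvDigitsEnd_ge cs i2
        rw [ih (pvDigitsEnd cs i2) _ (by omega)]
        have hdist : (if i2 < pvDigitsEnd cs i2 then
            (PySem.Int.ofChars? ((cs.drop i2).take (pvDigitsEnd cs i2 - i2))).getD 0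
            else (1 : Int)) = pvDistB cs i2 := by
          rw [← pvDist_eq]; rfl
        rw [hdist, pvStepsB_some cs i d i2 hlt hd, pvDrop_digitsEnd,
            List.append_assoc, List.singleton_append]
    · rw [if_neg hlt]
      have hnil : cs.drop i = [] := List.drop_eq_nil_of_le (by omega)
      rw [hnil]
      simp [pvStepsB, pvStepsBGo]

theorem pvLoopA_eq (cs : List Char) (i : Nat) (acc : List (String × Int)) :
    pvLoopA cs i acc = acc ++ pvStepsB (cs.drop i) := by
  unfold pvLoopA
  exact pvLoopAGo_eq cs (cs.length - i) i acc (by omega)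

theorem pvSteps_eq (cs : List Char) : pvStepsA cs = pvStepsBTop cs := by
  unfold pvStepsA pvStepsBTop
  by_cases h0 : cs = []
  · simp [h0]
  · have hlen : cs.length ≠ 0 := by simpa [List.length_eq_zero_iff] using h0
    have hlt0 : 0 < cs.length := by omega
    rw [if_neg hlen, if_neg h0, pvSplitDigits_eq]
    have hcons : cs = cs[0] :: cs.drop 1 := by
      have h := List.drop_eq_getElem_cons hlt0
      simpa using h
    have hhead : cs.getD 0 ' ' = cs[0] := pvGetD_head cs 0 hlt0
    have htw : cs.takeWhile PySem.Chars.isdigit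
        = if PySem.Chars.isdigit cs[0] then
            cs[0] :: ((cs.drop 1).takeWhile PySem.Chars.isdigit)
          else [] := by
      conv_lhs => rw [hcons]
      rw [List.takeWhile_cons]
    by_cases hd1 : PySem.Chars.isdigit cs[0]
    · rw [hhead, if_pos hd1]
      have hJ : pvDigitsEnd cs 0 = (cs.takeWhile PySem.Chars.isdigit).length := by
        rw [pvDigitsEnd_eq]; simp
      have htw_ne : cs.takeWhile PySem.Chars.isdigit ≠ [] := by
        rw [htw, if_pos hd1]; simp
      rw [hJ, pvLoopA_eq, pvTakeWhile_take, pvTakeWhile_drop, if_pos htw_ne]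
    · rw [hhead, if_neg hd1]
      have htwe : cs.takeWhile PySem.Chars.isdigit = [] := by rw [htw, if_neg hd1]
      have hdw : cs.dropWhile PySem.Chars.isdigit = cs := by
        have h := List.takeWhile_append_dropWhile (p := PySem.Chars.isdigit) (l := cs)
        rw [htwe] at h; simpa using h
      rw [pvLoopA_eq]
      simp [htwe, hdw]

theorem pvFold_eq (steps : List (String × Int)) (a b : Int) :
    steps.foldl (fun qr st =>
        let dqr := (PySem.Dict.get? pvDIRS st.1).getD (0, 0)
        (qr.1 + dqr.1 * st.2, qr.2 + dqr.2 * st.2)) (a, b)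
      = (a + (steps.map (fun st => ((PySem.Dict.get? pvDIRS st.1).getD (0, 0)).1 * st.2)).sum,
         b + (steps.map (fun st => ((PySem.Dict.get? pvDIRS st.1).getD (0, 0)).2 * st.2)).sum) := by
  induction steps generalizing a b with
  | nil => simp
  | cons st rest ih => simp [ih]; ring_nf; simp

-- ===== VERDICT (by name: the statement is the Claim_ definition above) =====
theorem parse_path_py_spec : Claim_equal_parse_path_py := by
  intro p _ _
  unfold Spec_parse_path_py parse_path_py parse_path_py_alt
  simp only [pvSteps_eq, pvFold_eq, zero_add]
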